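-- pv_equiv track=rewrite | github.com/Uriel1339/NarrAider | narraider_unified.py | generate_optimized_prompt
-- ===== SOURCE A (Python) =====
-- def generate_optimized_prompt(original, content_type, guideline):
--     """Generate an optimized version of the prompt."""
--     # This is a simple expansion based on keywords
--     # In the future, this could use an LLM to actually optimize
--
--     words = original.lower().split()
--
--     # Content-specific expansions
--     if content_type == "character":
--         additions = []
--         if not any(word in words for word in ["years", "old", "age"]):
--             additions.append("age not specified (suggest adding age)")
--         if not any(word in words for word in ["personality", "trait", "character"]):
--             additions.append("personality traits needed (e.g., 'brave but reckless')")
--         if not any(word in words for word in ["background", "history", "past"]):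
--             additions.append("backstory missing (e.g., 'raised by monks, seeking lost sibling')")
--
--         if additions:
--             return f"{original}\n\nSuggested additions:\n- " + "\n- ".join(additions)
--
--     elif content_type in ["scene-dialogue", "scene-combat", "scene-general", "scene-explicit"]:
--         additions = []
--         if not any(word in words for word in ["in", "at", "inside", "outside"]):
--             additions.append("location/setting (e.g., 'in a rain-soaked alley')")
--         if not any(word in words for word in ["tense", "happy", "sad", "angry", "emotional"]):
--             additions.append("emotional tone (e.g., 'tension builds', 'bittersweet moment')")
--
--         if additions:
--             return f"{original}\n\nSuggested additions:\n- " + "\n- ".join(additions)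
--
--     # Default: just add guideline hints
--     return f"{original}\n\nConsider adding more details:\n{guideline}"
-- ===== SOURCE B (Python) =====
-- # Inverted algorithm: instead of scanning the word list once per keyword group,
-- # scan the words ONCE, classifying each word through a keyword->group-index map,
-- # and collect the set of covered groups; then emit the hints of uncovered groups.
--
-- _CHAR_HINTS = [
--     "age not specified (suggest adding age)",
--     "personality traits needed (e.g., 'brave but reckless')",
--     "backstory missing (e.g., 'raised by monks, seeking lost sibling')",
-- ]
-- _SCENE_HINTS = [
--     "location/setting (e.g., 'in a rain-soaked alley')",
--     "emotional tone (e.g., 'tension builds', 'bittersweet moment')",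
-- ]
-- _CHAR_KW = {"years": 0, "old": 0, "age": 0,
--             "personality": 1, "trait": 1, "character": 1,
--             "background": 2, "history": 2, "past": 2}
-- _SCENE_KW = {"in": 0, "at": 0, "inside": 0, "outside": 0,
--              "tense": 1, "happy": 1, "sad": 1, "angry": 1, "emotional": 1}
--
--
-- def generate_optimized_prompt(original, content_type, guideline):
--     """Generate an optimized version of the prompt (single pass over the words)."""
--     if content_type == "character":
--         kw, hints = _CHAR_KW, _CHAR_HINTS
--     elif content_type in ("scene-dialogue", "scene-combat", "scene-general", "scene-explicit"):
--         kw, hints = _SCENE_KW, _SCENE_HINTS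
--     else:
--         kw, hints = None, []
--     if kw is not None:
--         covered = set()
--         for word in original.lower().split():
--             if word in kw:
--                 covered.add(kw[word])
--         additions = [h for i, h in enumerate(hints) if i not in covered]
--         if additions:
--             return f"{original}\n\nSuggested additions:\n- " + "\n- ".join(additions)
--     return f"{original}\n\nConsider adding more details:\n{guideline}"
-- ===== Notes on version B (the rewrite author's own statement) =====
-- stated objective: alternative
-- what changed: Inverts the traversal: instead of testing each keyword group against the word list (one membership scan per group), B scans the words ONCE, classifying each word through a precomputed keyword->group-index dict into a covered-group set, then emits the hints of the groups left uncovered.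
import Mathlib
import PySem

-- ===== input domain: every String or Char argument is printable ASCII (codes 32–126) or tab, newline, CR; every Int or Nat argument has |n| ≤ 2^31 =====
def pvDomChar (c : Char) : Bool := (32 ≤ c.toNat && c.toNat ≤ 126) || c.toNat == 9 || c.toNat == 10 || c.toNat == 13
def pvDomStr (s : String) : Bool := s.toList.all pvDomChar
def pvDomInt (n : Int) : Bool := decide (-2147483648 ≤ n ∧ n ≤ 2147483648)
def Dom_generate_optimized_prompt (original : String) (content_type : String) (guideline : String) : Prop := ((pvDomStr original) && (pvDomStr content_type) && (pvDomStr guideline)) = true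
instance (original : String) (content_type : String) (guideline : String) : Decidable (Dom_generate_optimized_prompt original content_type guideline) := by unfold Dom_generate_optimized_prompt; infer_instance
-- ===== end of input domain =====

-- B inverts A's traversal: one pass over the words, classifying each word through a
-- keyword->group-index dict into a covered-group set, then emitting the hints of the
-- uncovered groups (objective: alternative). Return values agree on all inputs.

-- ===== PORT A =====
def generate_optimized_prompt (original : String) (content_type : String) (guideline : String) : String :=
  let words := PySem.Str.split₀ (PySem.Str.lower original)
  if content_type = "character" then
    let additions : List String := []
    let additions := if !(["years", "old", "age"].any (fun w => words.contains w)) then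
        additions ++ ["age not specified (suggest adding age)"] else additions
    let additions := if !(["personality", "trait", "character"].any (fun w => words.contains w)) then
        additions ++ ["personality traits needed (e.g., 'brave but reckless')"] else additions
    let additions := if !(["background", "history", "past"].any (fun w => words.contains w)) then
        additions ++ ["backstory missing (e.g., 'raised by monks, seeking lost sibling')"] else additions
    if additions ≠ [] then
      original ++ "\n\nSuggested additions:\n- " ++ PySem.Str.join "\n- " additions
    else
      original ++ "\n\nConsider adding more details:\n" ++ guideline
  else if content_type ∈ ["scene-dialogue", "scene-combat", "scene-general", "scene-explicit"] then
    let additions : List String := []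
    let additions := if !(["in", "at", "inside", "outside"].any (fun w => words.contains w)) then
        additions ++ ["location/setting (e.g., 'in a rain-soaked alley')"] else additions
    let additions := if !(["tense", "happy", "sad", "angry", "emotional"].any (fun w => words.contains w)) then
        additions ++ ["emotional tone (e.g., 'tension builds', 'bittersweet moment')"] else additions
    if additions ≠ [] then
      original ++ "\n\nSuggested additions:\n- " ++ PySem.Str.join "\n- " additions
    else
      original ++ "\n\nConsider adding more details:\n" ++ guideline
  else
    original ++ "\n\nConsider adding more details:\n" ++ guideline

-- ===== PORT B =====
def pvCharHints : List String :=
  ["age not specified (suggest adding age)",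
   "personality traits needed (e.g., 'brave but reckless')",
   "backstory missing (e.g., 'raised by monks, seeking lost sibling')"]

def pvSceneHints : List String :=
  ["location/setting (e.g., 'in a rain-soaked alley')",
   "emotional tone (e.g., 'tension builds', 'bittersweet moment')"]

def pvCharKW : PySem.Dict String Int :=
  PySem.Dict.ofList [("years", 0), ("old", 0), ("age", 0),
    ("personality", 1), ("trait", 1), ("character", 1),
    ("background", 2), ("history", 2), ("past", 2)]

def pvSceneKW : PySem.Dict String Int :=
  PySem.Dict.ofList [("in", 0), ("at", 0), ("inside", 0), ("outside", 0),
    ("tense", 1), ("happy", 1), ("sad", 1), ("angry", 1), ("emotional", 1)]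

def generate_optimized_prompt_alt (original : String) (content_type : String) (guideline : String) : String :=
  let kwHints : Option (PySem.Dict String Int) × List String :=
    if content_type = "character" then (some pvCharKW, pvCharHints)
    else if content_type ∈ ["scene-dialogue", "scene-combat", "scene-general", "scene-explicit"] then
      (some pvSceneKW, pvSceneHints)
    else (none, [])
  match kwHints with
  | (some kw, hints) =>
    let covered : PySem.Set Int :=
      (PySem.Str.split₀ (PySem.Str.lower original)).foldl
        (fun s w => if kw.contains w then PySem.Set.add s (kw.getD w 0) else s)
        PySem.Set.empty
    let additions : List String :=
      (PySem.List.enumerate hints 0).filterMap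
        (fun p => if !(PySem.Set.contains covered p.1) then some p.2 else none)
    if additions ≠ [] then
      original ++ "\n\nSuggested additions:\n- " ++ PySem.Str.join "\n- " additions
    else
      original ++ "\n\nConsider adding more details:\n" ++ guideline
  | (none, _) =>
    original ++ "\n\nConsider adding more details:\n" ++ guideline

-- ===== PRECONDITION & SPEC =====
def Spec_generate_optimized_prompt (original : String) (content_type : String) (guideline : String) (out : String) : Prop := out = generate_optimized_prompt_alt original content_type guideline
instance (original : String) (content_type : String) (guideline : String) (out : String) : Decidable (Spec_generate_optimized_prompt original content_type guideline out) := by unfold Spec_generate_optimized_prompt; infer_instance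

-- ===== CLAIM (what is proved, stated in full; the proofs are below) =====
def Claim_equal_generate_optimized_prompt : Prop := ∀ (original : String) (content_type : String) (guideline : String), Dom_generate_optimized_prompt original content_type guideline → Spec_generate_optimized_prompt original content_type guideline (generate_optimized_prompt original content_type guideline)

-- ===== LEMMAS AND PROOFS =====

-- loop invariant of B's single pass: group i ends up in the covered set iff it was there
-- already or some word of the list maps to i in the keyword dict
set_option maxRecDepth 4000 in
lemma pv_covered_fold (kw : PySem.Dict String Int) (ws : List String) (s : PySem.Set Int) (i : Int) :
    PySem.Set.contains
      (ws.foldl (fun s w => if kw.contains w then PySem.Set.add s (kw.getD w 0) else s) s) i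
    = (PySem.Set.contains s i || ws.any (fun w => kw.get? w == some i)) := by
  induction ws generalizing s with
  | nil => simp
  | cons w ws ih =>
    simp only [List.foldl_cons, List.any_cons, ih]
    rcases h : kw.get? w with _ | v
    · have hc : kw.contains w = false := by
        rw [PySem.Dict.contains_eq_isSome_get?, h]; rfl
      simp [hc]
    · have hc : kw.contains w = true := by
        rw [PySem.Dict.contains_eq_isSome_get?, h]; rfl
      have hd : kw.getD w 0 = v := by rw [PySem.Dict.getD_eq_get?_getD, h]; rfl
      have hadd : PySem.Set.contains (PySem.Set.add s v) i = (PySem.Set.contains s i || i == v) := by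
        rw [Bool.eq_iff_iff]
        simp [PySem.Set.mem_add]
      simp only [hc, if_true, hd, hadd]
      cases hb : PySem.Set.contains s i <;> cases hb2 : ws.any (fun w => kw.get? w == some i) <;>
        simp [eq_comm]

-- a keyword dict sending exactly the keys ks to i turns B's word-side test into A's key-side test
lemma pv_any_swap (kw : PySem.Dict String Int) (ws ks : List String) (i : Int)
    (h : ∀ w, kw.get? w = some i ↔ w ∈ ks) :
    ws.any (fun w => kw.get? w == some i) = ks.any (fun k => ws.contains k) := by
  rw [Bool.eq_iff_iff]
  simp only [List.any_eq_true, beq_iff_eq, List.contains_iff_mem, h]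
  exact ⟨fun ⟨x, hx, hk⟩ => ⟨x, hk, hx⟩, fun ⟨x, hx, hk⟩ => ⟨x, hk, hx⟩⟩

-- the character keyword dict, group by group
set_option maxRecDepth 4000 in
lemma pv_charKW_get? (w : String) (i : Int) :
    pvCharKW.get? w = some i ↔
      (i = 0 ∧ w ∈ ["years", "old", "age"]) ∨
      (i = 1 ∧ w ∈ ["personality", "trait", "character"]) ∨
      (i = 2 ∧ w ∈ ["background", "history", "past"]) := by
  have h : pvCharKW = PySem.Dict.mk [("years", 0), ("old", 0), ("age", 0),
    ("personality", 1), ("trait", 1), ("character", 1),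
    ("background", 2), ("history", 2), ("past", 2)] := by decide
  rw [h]
  simp only [PySem.Dict.get?_mk_cons, beq_iff_eq]
  split_ifs <;> simp_all [eq_comm, PySem.Dict.get?]

-- the scene keyword dict, group by group
set_option maxRecDepth 4000 in
lemma pv_sceneKW_get? (w : String) (i : Int) :
    pvSceneKW.get? w = some i ↔
      (i = 0 ∧ w ∈ ["in", "at", "inside", "outside"]) ∨
      (i = 1 ∧ w ∈ ["tense", "happy", "sad", "angry", "emotional"]) := by
  have h : pvSceneKW = PySem.Dict.mk [("in", 0), ("at", 0), ("inside", 0), ("outside", 0),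
    ("tense", 1), ("happy", 1), ("sad", 1), ("angry", 1), ("emotional", 1)] := by decide
  rw [h]
  simp only [PySem.Dict.get?_mk_cons, beq_iff_eq]
  split_ifs <;> simp_all [eq_comm, PySem.Dict.get?]

set_option maxHeartbeats 1000000 in
theorem pv_equal (original content_type guideline : String) :
    generate_optimized_prompt original content_type guideline
      = generate_optimized_prompt_alt original content_type guideline := by
  have hchar : ∀ ws : List String,
      ∀ i : Int, ∀ ks : List String,
      (∀ w, pvCharKW.get? w = some i ↔ w ∈ ks) →
      PySem.Set.contains
        (ws.foldl (fun s w => if pvCharKW.contains w then PySem.Set.add s (pvCharKW.getD w 0) else s)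
          PySem.Set.empty) i = ks.any (fun k => ws.contains k) := by
    intro ws i ks h
    rw [pv_covered_fold, pv_any_swap pvCharKW ws ks i h]
    simp [PySem.Set.empty]
  have hscene : ∀ ws : List String,
      ∀ i : Int, ∀ ks : List String,
      (∀ w, pvSceneKW.get? w = some i ↔ w ∈ ks) →
      PySem.Set.contains
        (ws.foldl (fun s w => if pvSceneKW.contains w then PySem.Set.add s (pvSceneKW.getD w 0) else s)
          PySem.Set.empty) i = ks.any (fun k => ws.contains k) := by
    intro ws i ks h
    rw [pv_covered_fold, pv_any_swap pvSceneKW ws ks i h]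
    simp [PySem.Set.empty]
  simp only [generate_optimized_prompt, generate_optimized_prompt_alt]
  generalize hws : PySem.Str.split₀ (PySem.Str.lower original) = ws
  by_cases h1 : content_type = "character"
  · simp only [h1, if_true]
    simp only [pvCharHints, PySem.List.enumerate_cons, PySem.List.enumerate_nil,
      List.filterMap_cons, List.filterMap_nil,
      show ((0:Int)+1 = 1) from rfl, show ((1:Int)+1 = 2) from rfl]
    rw [hchar ws 0 ["years", "old", "age"] (fun w => by rw [pv_charKW_get? w 0]; simp),
        hchar ws 1 ["personality", "trait", "character"] (fun w => by rw [pv_charKW_get? w 1]; simp),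
        hchar ws 2 ["background", "history", "past"] (fun w => by rw [pv_charKW_get? w 2]; simp)]
    split_ifs <;> simp_all
  · by_cases h2 : content_type ∈ ["scene-dialogue", "scene-combat", "scene-general", "scene-explicit"]
    · have h1' : ¬ content_type = "character" := h1
      simp only [h1', if_false, h2, if_true]
      simp only [pvSceneHints, PySem.List.enumerate_cons, PySem.List.enumerate_nil,
        List.filterMap_cons, List.filterMap_nil,
        show ((0:Int)+1 = 1) from rfl]
      rw [hscene ws 0 ["in", "at", "inside", "outside"] (fun w => by rw [pv_sceneKW_get? w 0]; simp),
          hscene ws 1 ["tense", "happy", "sad", "angry", "emotional"] (fun w => by rw [pv_sceneKW_get? w 1]; simp)]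
      split_ifs <;> simp_all
    · simp [h1, h2]

-- ===== VERDICT (by name: the statement is the Claim_ definition above) =====
theorem generate_optimized_prompt_spec : Claim_equal_generate_optimized_prompt := by
  intro o c g _
  unfold Spec_generate_optimized_prompt
  exact pv_equal o c g
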